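-- pv_equiv track=rewrite | github.com/pypi-data/pypi-mirror-402 | packages/amsdal_ml/amsdal_ml-0.2.2.tar.gz/amsdal_ml-0.2.2/tests/agents_tests/test_fakes.py | _chunk_cycle
-- ===== SOURCE A (Python) =====
-- def _chunk_cycle(text: str) -> list[str]:
--     sizes = [3, 4, 5]
--     res: list[str] = []
--     pos, i, n = 0, 0, len(text)
--     while pos < n:
--         sz = sizes[i % len(sizes)]
--         res.append(text[pos : pos + sz])
--         pos += sz
--         i += 1
--     return res
-- ===== SOURCE B (Python) =====
-- def _chunk_cycle(text: str) -> list[str]: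
--     sizes = (3, 4, 5)
--     n = len(text)
--     bounds = [0]
--     pos = 0
--     i = 0
--     while pos < n:
--         pos += sizes[i % 3]
--         bounds.append(pos)
--         i += 1
--     return [text[a:b] for a, b in zip(bounds, bounds[1:])]
-- ===== Notes on version B (the rewrite author's own statement) =====
-- stated objective: alternative
-- what changed: B first computes the list of cut boundaries (0, 3, 7, 12, ...) in one pass, then slices the text in a second pass via zip over consecutive boundaries, instead of A's single fused loop that slices while scanning.
import Mathlib
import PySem

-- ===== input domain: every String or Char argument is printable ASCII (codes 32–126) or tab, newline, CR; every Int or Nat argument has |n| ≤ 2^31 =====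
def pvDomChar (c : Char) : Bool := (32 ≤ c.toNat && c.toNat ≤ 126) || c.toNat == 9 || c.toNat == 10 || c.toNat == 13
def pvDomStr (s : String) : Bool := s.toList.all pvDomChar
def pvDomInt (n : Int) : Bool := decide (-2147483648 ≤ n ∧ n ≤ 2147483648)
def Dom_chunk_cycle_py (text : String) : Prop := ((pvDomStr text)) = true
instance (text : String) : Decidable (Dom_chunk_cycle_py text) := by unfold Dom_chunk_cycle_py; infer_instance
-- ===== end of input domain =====

-- B computes the cut boundaries in one pass, then slices the text over consecutive
-- boundary pairs in a second pass (alternative decomposition; same cost as A).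

-- sizes[i % len(sizes)] for sizes = [3, 4, 5] (shared constant table of both Pythons)
def pvSzOf (i : Nat) : Nat := [3, 4, 5].getD (i % 3) 0

theorem pvSzOf_ge (i : Nat) : 3 ≤ pvSzOf i := by
  have h : i % 3 = 0 ∨ i % 3 = 1 ∨ i % 3 = 2 := by omega
  rcases h with h | h | h <;> simp [pvSzOf, h]

-- ===== PORT A =====
-- A's while loop: slice text[pos : pos + sz] (exact: 0 ≤ pos ≤ pos + sz, Python
-- slices clamp at the end exactly like drop/take), advance pos, cycle i.
def chunkA (cs : List Char) (n pos i : Nat) : List String :=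
  if _h : pos < n then
    let sz := pvSzOf i
    String.ofList ((cs.drop pos).take sz) :: chunkA cs n (pos + sz) (i + 1)
  else []
termination_by n - pos
decreasing_by have := pvSzOf_ge i; omega

def chunk_cycle_py (text : String) : List String :=
  chunkA text.toList text.toList.length 0 0

-- ===== PORT B =====
-- B's first pass: the boundary positions after 0 (bounds = 0 :: boundAux n 0 0).
def boundAux (n pos i : Nat) : List Nat :=
  if _h : pos < n then
    let p := pos + pvSzOf i
    p :: boundAux n p (i + 1)
  else []
termination_by n - pos
decreasing_by have := pvSzOf_ge i; omega

-- B's second pass: [text[a:b] for a, b in zip(bounds, bounds[1:])]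
def chunk_cycle_py_alt (text : String) : List String :=
  let n := text.toList.length
  let bounds : List Nat := 0 :: boundAux n 0 0
  (bounds.zip bounds.tail).map
    (fun ab => String.ofList ((text.toList.drop ab.1).take (ab.2 - ab.1)))

-- ===== PRECONDITION & SPEC =====
def Spec_chunk_cycle_py (text : String) (out : List String) : Prop := out = chunk_cycle_py_alt text
instance (text : String) (out : List String) : Decidable (Spec_chunk_cycle_py text out) := by unfold Spec_chunk_cycle_py; infer_instance

-- ===== CLAIM (what is proved, stated in full; the proofs are below) =====
def Claim_equal_chunk_cycle_py : Prop := ∀ (text : String), Dom_chunk_cycle_py text → Spec_chunk_cycle_py text (chunk_cycle_py text)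

-- ===== LEMMAS AND PROOFS =====

-- A's fused loop from (pos, i) equals B's slice-pass over B's boundaries from (pos, i)
-- (induction on an upper bound k of the remaining length n - pos).
theorem chunkA_eq_zip (cs : List Char) (n : Nat) :
    ∀ k pos i, n - pos ≤ k → chunkA cs n pos i =
      ((pos :: boundAux n pos i).zip (boundAux n pos i)).map
        (fun ab => String.ofList ((cs.drop ab.1).take (ab.2 - ab.1))) := by
  intro k
  induction k with
  | zero =>
      intro pos i hk
      have h : ¬ pos < n := by omega
      rw [chunkA, boundAux]
      simp [h]
  | succ k ih =>
      intro pos i hk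
      by_cases h : pos < n
      · rw [chunkA, boundAux]
        simp only [dif_pos h, List.zip_cons_cons, List.map_cons]
        have hsz := pvSzOf_ge i
        rw [ih (pos + pvSzOf i) (i + 1) (by omega)]
        have h2 : pos + pvSzOf i - pos = pvSzOf i := by omega
        rw [h2]
      · rw [chunkA, boundAux]
        simp [h]

theorem chunk_cycle_py_eq (text : String) : chunk_cycle_py text = chunk_cycle_py_alt text := by
  unfold chunk_cycle_py chunk_cycle_py_alt
  exact chunkA_eq_zip text.toList text.toList.length text.toList.length 0 0 (by omega)

-- ===== VERDICT (by name: the statement is the Claim_ definition above) =====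
theorem chunk_cycle_py_spec : Claim_equal_chunk_cycle_py := by
  intro text _
  unfold Spec_chunk_cycle_py
  exact chunk_cycle_py_eq text
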